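-- pv_equiv track=rewrite | github.com/weiyangzen/awesome_algorithms | Algorithms/数学-算法-0043-Schönhage-Strassen算法/demo.py | _choose_ring_params
-- ===== SOURCE A (Python) =====
-- from typing import Dict, List, Sequence, Tuple
--
-- def _order_of_two_mod_fermat_like(k: int, modulus: int) -> int:
--     """Return multiplicative order of 2 modulo (2^k + 1), power-of-two order."""
--     order = 2 * k
--     while order % 2 == 0 and pow(2, order // 2, modulus) == 1:
--         order //= 2
--     return order
--
-- def _choose_ring_params(conv_len: int, limb_bits: int) -> Tuple[int, int, int]:
--     """Choose (modulus, k, order_of_two) for an NTT of length conv_len.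
--
--     Conditions:
--     1) modulus = 2^k + 1 is large enough to avoid coefficient wrap-around.
--     2) order_of_two is divisible by conv_len so we can build a conv_len-th root.
--     """
--     max_coeff = conv_len * ((1 << limb_bits) - 1) ** 2
--
--     k = 1
--     while (1 << k) <= max_coeff or 2 * k < conv_len:
--         k <<= 1
--
--     while True:
--         modulus = (1 << k) + 1
--         order = _order_of_two_mod_fermat_like(k, modulus)
--         if order >= conv_len and order % conv_len == 0:
--             return modulus, k, order
--         k <<= 1
-- ===== SOURCE B (Python) =====
-- def _choose_ring_params(conv_len: int, limb_bits: int):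
--     """Fused single search: the order of 2 mod 2^k+1 is exactly 2*k in closed
--     form (2^k == -1 mod 2^k+1), so the divisibility test joins the sizing loop."""
--     max_coeff = conv_len * ((1 << limb_bits) - 1) ** 2
--     k = 1
--     while (1 << k) <= max_coeff or 2 * k < conv_len or (2 * k) % conv_len != 0:
--         k *= 2
--     return (1 << k) + 1, k, 2 * k
-- ===== Notes on version B (the rewrite author's own statement) =====
-- stated objective: simpler
-- what changed: B deletes the _order_of_two_mod_fermat_like helper (the order of 2 mod 2^k+1 is exactly 2*k since 2^k = -1 there, so its halving/modular-exponentiation loop never fires) and fuses A's two while loops into one search: smallest power-of-two k with 2^k > max_coeff, 2k >= conv_len and 2k % conv_len == 0.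
import Mathlib
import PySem

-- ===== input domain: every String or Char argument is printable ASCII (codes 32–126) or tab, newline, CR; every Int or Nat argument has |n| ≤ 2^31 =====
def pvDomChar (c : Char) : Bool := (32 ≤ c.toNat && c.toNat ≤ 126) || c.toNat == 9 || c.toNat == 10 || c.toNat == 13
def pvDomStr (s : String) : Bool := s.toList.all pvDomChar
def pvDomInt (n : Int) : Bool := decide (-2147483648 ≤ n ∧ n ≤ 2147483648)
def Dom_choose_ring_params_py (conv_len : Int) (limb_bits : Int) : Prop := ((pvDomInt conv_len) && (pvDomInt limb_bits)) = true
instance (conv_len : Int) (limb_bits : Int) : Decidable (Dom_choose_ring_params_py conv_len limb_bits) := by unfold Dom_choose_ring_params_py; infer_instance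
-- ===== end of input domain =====

-- B fuses A's two search loops into one and replaces the multiplicative-order helper
-- by the closed form order = 2*k (2^k ≡ -1 mod 2^k+1); objective: simpler.

-- ===== PORT A =====
-- loop of _order_of_two_mod_fermat_like; the fuel only makes the loop total
-- (order at least halves each iteration, so the fuel never runs out)
def pvOrderLoopA (modulus : Int) : Nat → Int → Int
  | 0, order => order
  | fuel+1, order =>
    -- pow(2, order // 2, modulus); the exponent is nonnegative whenever the helper is called
    if PySem.Int.mod order 2 = 0 ∧ PySem.Int.powMod 2 (PySem.Int.floordiv order 2).toNat modulus = 1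
    then pvOrderLoopA modulus fuel (PySem.Int.floordiv order 2)
    else order

def pvOrderOfTwoA (k : Int) (modulus : Int) : Int :=
  pvOrderLoopA modulus ((2 * k).toNat + 1) (2 * k)

-- first while loop of _choose_ring_params (k sizing); 1 << k written 2 ^ k.toNat (k stays ≥ 1)
def pvSizeLoopA (max_coeff conv_len : Int) : Nat → Int → Int
  | 0, k => k
  | fuel+1, k =>
    if 2 ^ k.toNat ≤ max_coeff ∨ 2 * k < conv_len
    then pvSizeLoopA max_coeff conv_len fuel (2 * k)
    else k

-- second while loop; (0,0,0) on fuel exhaustion (there Python diverges, outside Pre_)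
def pvMainLoopA (conv_len : Int) : Nat → Int → Int × Int × Int
  | 0, _ => (0, 0, 0)
  | fuel+1, k =>
    let modulus : Int := 2 ^ k.toNat + 1
    let order := pvOrderOfTwoA k modulus
    if conv_len ≤ order ∧ PySem.Int.mod order conv_len = 0
    then (modulus, k, order)
    else pvMainLoopA conv_len fuel (2 * k)

def choose_ring_params_py (conv_len : Int) (limb_bits : Int) : Int × Int × Int :=
  -- 1 << limb_bits written 2 ^ limb_bits.toNat (exact for limb_bits ≥ 0; Python raises otherwise)
  let max_coeff := conv_len * (2 ^ limb_bits.toNat - 1) ^ 2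
  let fuel := 2 * limb_bits.toNat + conv_len.natAbs + 40
  pvMainLoopA conv_len fuel (pvSizeLoopA max_coeff conv_len fuel 1)

-- ===== PORT B =====
-- single fused loop of Source B; same fuel-guard convention as port A
def pvLoopB (max_coeff conv_len : Int) : Nat → Int → Int × Int × Int
  | 0, _ => (0, 0, 0)
  | fuel+1, k =>
    if 2 ^ k.toNat ≤ max_coeff ∨ 2 * k < conv_len ∨ PySem.Int.mod (2 * k) conv_len ≠ 0
    then pvLoopB max_coeff conv_len fuel (2 * k)
    else (2 ^ k.toNat + 1, k, 2 * k)

def choose_ring_params_py_alt (conv_len : Int) (limb_bits : Int) : Int × Int × Int :=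
  let max_coeff := conv_len * (2 ^ limb_bits.toNat - 1) ^ 2
  let fuel := 2 * limb_bits.toNat + conv_len.natAbs + 40
  pvLoopB max_coeff conv_len (fuel + fuel) 1

-- ===== PRECONDITION & SPEC =====
-- Pre_ excludes exactly the inputs where Python A does not return normally: limb_bits < 0
-- (ValueError from 1 << limb_bits), conv_len = 0 (ZeroDivisionError in 'order % conv_len'),
-- and |conv_len| not a power of two, where the search loops forever (the candidate
-- orders are the powers of two 2*k and can never be divisible by conv_len).
def Pre_choose_ring_params_py (conv_len : Int) (limb_bits : Int) : Prop :=
  0 ≤ limb_bits ∧ conv_len.natAbs = 2 ^ Nat.log2 conv_len.natAbs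
instance (conv_len : Int) (limb_bits : Int) : Decidable (Pre_choose_ring_params_py conv_len limb_bits) := by
  unfold Pre_choose_ring_params_py; infer_instance

def pvWitness_choose_ring_params_py : Int × Int := (4, 3)

def Spec_choose_ring_params_py (conv_len : Int) (limb_bits : Int) (out : Int × Int × Int) : Prop := out = choose_ring_params_py_alt conv_len limb_bits
instance (conv_len : Int) (limb_bits : Int) (out : Int × Int × Int) : Decidable (Spec_choose_ring_params_py conv_len limb_bits out) := by unfold Spec_choose_ring_params_py; infer_instance

-- ===== CLAIM (what is proved, stated in full; the proofs are below) =====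
def Claim_equal_choose_ring_params_py : Prop := ∀ (conv_len : Int) (limb_bits : Int), Dom_choose_ring_params_py conv_len limb_bits → Pre_choose_ring_params_py conv_len limb_bits → Spec_choose_ring_params_py conv_len limb_bits (choose_ring_params_py conv_len limb_bits)

-- ===== LEMMAS AND PROOFS =====

-- the condition of A's sizing loop
def pvCond (mc cl k : Int) : Prop := 2 ^ k.toNat ≤ mc ∨ 2 * k < cl

theorem pvOrderOfTwoA_eq (k : Int) (hk : 1 ≤ k) :
    pvOrderOfTwoA k (2 ^ k.toNat + 1) = 2 * k := by
  have hfd : PySem.Int.floordiv (2 * k) 2 = k := by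
    rw [PySem.Int.floordiv_eq_ediv_of_pos (by norm_num)]
    omega
  have h1 : (1 : Int) < 2 ^ k.toNat := by
    have := Nat.one_lt_two_pow (n := k.toNat) (by omega)
    exact_mod_cast this
  have hpow : PySem.Int.powMod 2 (PySem.Int.floordiv (2 * k) 2).toNat (2 ^ k.toNat + 1) ≠ 1 := by
    rw [hfd, PySem.Int.powMod_eq, PySem.Int.mod_eq_emod_of_pos (by positivity)]
    rw [Int.emod_eq_of_lt (by positivity) (by omega)]
    omega
  unfold pvOrderOfTwoA
  simp only [pvOrderLoopA, hpow, and_false, if_false]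

theorem pvCond_mono (mc cl k : Int) (hk : 1 ≤ k) (h : ¬ pvCond mc cl k) :
    ¬ pvCond mc cl (2 * k) := by
  unfold pvCond at *
  push_neg at *
  refine ⟨?_, by omega⟩
  have hle : (2 : Int) ^ k.toNat ≤ 2 ^ (2 * k).toNat :=
    pow_le_pow_right₀ (by norm_num) (by omega)
  omega

theorem pvPhase2 (mc cl : Int) : ∀ (fA fB : Nat) (k : Int), 1 ≤ k → ¬ pvCond mc cl k →
    (∃ n, n < fA ∧ n < fB ∧ PySem.Int.mod (2 * (2 ^ n * k)) cl = 0) →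
    pvMainLoopA cl fA k = pvLoopB mc cl fB k := by
  intro fA
  induction fA with
  | zero => intro fB k _ _ ⟨n, hn, _, _⟩; omega
  | succ fA ih =>
    intro fB k hk hC ⟨n, hnA, hnB, hmod⟩
    match fB with
    | 0 => omega
    | fB + 1 =>
      have hcl : cl ≤ 2 * k := by
        unfold pvCond at hC; push_neg at hC; omega
      simp only [pvMainLoopA, pvLoopB, pvOrderOfTwoA_eq k hk]
      by_cases hm : PySem.Int.mod (2 * k) cl = 0
      · have hA : cl ≤ 2 * k ∧ PySem.Int.mod (2 * k) cl = 0 := ⟨hcl, hm⟩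
        have hB : ¬ (2 ^ k.toNat ≤ mc ∨ 2 * k < cl ∨ PySem.Int.mod (2 * k) cl ≠ 0) := by
          unfold pvCond at hC; push_neg at hC
          push_neg; exact ⟨hC.1, hC.2, hm⟩
        rw [if_pos hA, if_neg hB]
      · have hA : ¬ (cl ≤ 2 * k ∧ PySem.Int.mod (2 * k) cl = 0) := fun h => hm h.2
        have hB : (2 ^ k.toNat ≤ mc ∨ 2 * k < cl ∨ PySem.Int.mod (2 * k) cl ≠ 0) :=
          Or.inr (Or.inr hm)
        rw [if_neg hA, if_pos hB]
        have hn0 : n ≠ 0 := by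
          intro h; subst h; simp at hmod; exact hm (by simpa using hmod)
        obtain ⟨m, rfl⟩ := Nat.exists_eq_succ_of_ne_zero hn0
        refine ih fB (2 * k) (by omega) (pvCond_mono mc cl k hk hC) ⟨m, by omega, by omega, ?_⟩
        have : (2 : Int) ^ (m + 1) * k = 2 ^ m * (2 * k) := by ring
        rwa [this] at hmod

theorem pvPhase1 (mc cl : Int) (N : Nat)
    (hacc : ∀ k : Int, 1 ≤ k → ∃ n, n < N ∧ PySem.Int.mod (2 * (2 ^ n * k)) cl = 0) :
    ∀ (f : Nat) (k : Int), 1 ≤ k → (∃ n, n < f ∧ ¬ pvCond mc cl (2 ^ n * k)) →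
    pvMainLoopA cl N (pvSizeLoopA mc cl f k) = pvLoopB mc cl (f + N) k := by
  intro f
  induction f with
  | zero => intro k _ ⟨n, hn, _⟩; omega
  | succ f ih =>
    intro k hk ⟨n, hnf, hcond⟩
    by_cases hc : pvCond mc cl k
    · have hc' : 2 ^ k.toNat ≤ mc ∨ 2 * k < cl := hc
      have hstep : pvSizeLoopA mc cl (f + 1) k = pvSizeLoopA mc cl f (2 * k) := by
        simp only [pvSizeLoopA]; rw [if_pos hc']
      rw [hstep]
      have hfB : f + 1 + N = (f + N) + 1 := by omega
      rw [hfB]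
      have hB : (2 ^ k.toNat ≤ mc ∨ 2 * k < cl ∨ PySem.Int.mod (2 * k) cl ≠ 0) := by
        rcases hc with h | h
        · exact Or.inl h
        · exact Or.inr (Or.inl h)
      have hstepB : pvLoopB mc cl ((f + N) + 1) k = pvLoopB mc cl (f + N) (2 * k) := by
        simp only [pvLoopB]; rw [if_pos hB]
      rw [hstepB]
      have hn0 : n ≠ 0 := by
        intro h; subst h; simp at hcond; exact hcond hc
      obtain ⟨m, rfl⟩ := Nat.exists_eq_succ_of_ne_zero hn0
      refine ih (2 * k) (by omega) ⟨m, by omega, ?_⟩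
      have : (2 : Int) ^ (m + 1) * k = 2 ^ m * (2 * k) := by ring
      rwa [this] at hcond
    · have hc' : ¬ (2 ^ k.toNat ≤ mc ∨ 2 * k < cl) := hc
      have hstep : pvSizeLoopA mc cl (f + 1) k = k := by
        simp only [pvSizeLoopA]; rw [if_neg hc']
      rw [hstep]
      obtain ⟨n', hn', hmod⟩ := hacc k hk
      exact pvPhase2 mc cl N (f + 1 + N) k hk hc ⟨n', hn', by omega, hmod⟩

-- ===== VERDICT (by name: the statement is the Claim_ definition above) =====
theorem choose_ring_params_py_spec : Claim_equal_choose_ring_params_py := by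
  intro cl lb _ hpre
  obtain ⟨hlb, habs⟩ := hpre
  set j := Nat.log2 cl.natAbs with hjdef
  have hj : j < cl.natAbs + 1 := by
    have := Nat.lt_two_pow_self (n := j)
    omega
  unfold Spec_choose_ring_params_py choose_ring_params_py choose_ring_params_py_alt
  set L := lb.toNat with hL
  set mc : Int := cl * (2 ^ L - 1) ^ 2 with hmc
  set N : Nat := 2 * L + cl.natAbs + 40 with hN
  have hclj : cl ≤ 2 ^ j := by
    have h1 : cl ≤ (cl.natAbs : Int) := Int.le_natAbs
    have h2 : (cl.natAbs : Int) = (2 : Int) ^ j := by rw [habs]; push_cast; ring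
    omega
  have hacc : ∀ k : Int, 1 ≤ k → ∃ n, n < N ∧ PySem.Int.mod (2 * (2 ^ n * k)) cl = 0 := by
    intro k hk
    refine ⟨j, by omega, ?_⟩
    rw [PySem.Int.mod_eq_zero_iff_dvd]
    rw [← Int.natAbs_dvd, habs]
    exact ⟨2 * k, by push_cast; ring⟩
  have hsize : ∃ n, n < N ∧ ¬ pvCond mc cl (2 ^ n * 1) := by
    refine ⟨j + 2 * L + 1, by omega, ?_⟩
    set n := j + 2 * L + 1 with hn
    have hcast : ((2 : Int) ^ n * 1) = ((2 ^ n : Nat) : Int) := by push_cast; ring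
    unfold pvCond
    push_neg
    have hone : (1 : Int) ≤ 2 ^ L := one_le_pow₀ (by norm_num)
    constructor
    · -- mc < 2 ^ (2^n * 1).toNat
      have htn : ((2 : Int) ^ n * 1).toNat = 2 ^ n := by rw [hcast, Int.toNat_natCast]
      rw [htn]
      have hsq : ((2 : Int) ^ L - 1) ^ 2 < ((2 : Int) ^ L) ^ 2 :=
        pow_lt_pow_left₀ (by omega) (by omega) (by norm_num)
      have hstep1 : mc ≤ (2 : Int) ^ j * ((2 : Int) ^ L - 1) ^ 2 :=
        mul_le_mul_of_nonneg_right hclj (sq_nonneg _)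
      have hstep2 : (2 : Int) ^ j * ((2 : Int) ^ L - 1) ^ 2 < 2 ^ j * ((2 : Int) ^ L) ^ 2 :=
        mul_lt_mul_of_pos_left hsq (by positivity)
      have hstep3 : (2 : Int) ^ j * ((2 : Int) ^ L) ^ 2 = 2 ^ (j + 2 * L) := by
        rw [← pow_mul, ← pow_add]; ring_nf
      have hlt : j + 2 * L < 2 ^ n := by
        have := Nat.lt_two_pow_self (n := j + 2 * L)
        have h2 : (2 : Nat) ^ (j + 2 * L) ≤ 2 ^ n := Nat.pow_le_pow_right (by norm_num) (by omega)
        omega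
      have hstep4 : (2 : Int) ^ (j + 2 * L) < 2 ^ (2 ^ n) :=
        pow_lt_pow_right₀ (by norm_num) hlt
      omega
    · -- cl ≤ 2 * (2^n * 1)
      have hjn : (2 : Int) ^ j ≤ 2 ^ n := pow_le_pow_right₀ (by norm_num) (by omega)
      have hpos : (0 : Int) < 2 ^ n := by positivity
      omega
  show pvMainLoopA cl N (pvSizeLoopA mc cl N 1) = pvLoopB mc cl (N + N) 1
  exact pvPhase1 mc cl N hacc N 1 (by norm_num) hsize
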